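-- pv_equiv track=rewrite | github.com/XpNow/tool-v1 | phoenix-tool-pattern-v1/phoenix-tool/app/cli.py | _parse_trace_shortcut_args
-- ===== SOURCE A (Python) =====
-- def _parse_trace_shortcut_args(args: list[str]):
--     """Parse trace shortcut args after <id>. Returns (depth, item_filter)."""
--     depth = None
--     item_parts: list[str] = []
--     for a in args:
--         if a.isdigit() and depth is None:
--             depth = int(a)
--         else:
--             item_parts.append(a)
--     item = " ".join(item_parts).strip() or None
--     return depth, item
-- ===== SOURCE B (Python) =====
-- def _parse_trace_shortcut_args(args: list[str]):
--     """Parse trace shortcut args after <id>. Returns (depth, item_filter)."""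
--     hit = next(((i, a) for i, a in enumerate(args) if a.isdigit()), None)
--     if hit is None:
--         depth, item_parts = None, args
--     else:
--         i, a = hit
--         depth, item_parts = int(a), args[:i] + args[i + 1:]
--     item = " ".join(item_parts).strip() or None
--     return depth, item
-- ===== Notes on version B (the rewrite author's own statement) =====
-- stated objective: alternative
-- what changed: Replaces A's single accumulating loop with state (depth, item_parts) by a locate-pivot-then-slice shape: find the first all-digit argument's index, then build the item parts as the two slices around it.
import Mathlib
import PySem

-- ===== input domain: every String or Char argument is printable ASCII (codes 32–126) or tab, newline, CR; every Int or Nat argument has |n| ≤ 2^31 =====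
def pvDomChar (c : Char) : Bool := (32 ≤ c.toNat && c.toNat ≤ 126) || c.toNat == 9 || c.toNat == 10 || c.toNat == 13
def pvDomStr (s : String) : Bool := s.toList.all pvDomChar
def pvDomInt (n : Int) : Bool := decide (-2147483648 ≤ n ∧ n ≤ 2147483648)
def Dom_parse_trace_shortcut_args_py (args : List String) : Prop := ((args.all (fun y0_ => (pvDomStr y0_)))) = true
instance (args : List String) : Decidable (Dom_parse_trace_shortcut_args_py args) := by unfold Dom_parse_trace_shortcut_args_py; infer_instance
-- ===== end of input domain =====

-- B replaces A's single accumulating loop by locate-first-digit-index, then slice around it; alternative decomposition, same cost.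


-- int(a) ported by hand for an ALL-DIGIT string (both programs only call int on a string passing isdigit); exact there
def pvDigitsToInt (s : String) : Int :=
  s.toList.foldl (fun n c => 10 * n + ((c.toNat : Int) - 48)) 0

-- ===== PORT A =====
def parse_trace_shortcut_args_py (args : List String) : Option Int × Option String :=
  let st := args.foldl
    (fun (st : Option Int × List String) a =>
      if PySem.Str.strIsdigit a && st.1.isNone then (some (pvDigitsToInt a), st.2)
      else (st.1, st.2 ++ [a]))
    ((none : Option Int), ([] : List String))
  let item := PySem.Str.strip (PySem.Str.join " " st.2)
  (st.1, if item = "" then none else some item)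

-- ===== PORT B =====
def parse_trace_shortcut_args_py_alt (args : List String) : Option Int × Option String :=
  let hit := (PySem.List.enumerate args).find? (fun p => PySem.Str.strIsdigit p.2)
  let dp : Option Int × List String :=
    match hit with
    | none => (none, args)
    | some (i, a) => (some (pvDigitsToInt a), args.take i.toNat ++ args.drop (i.toNat + 1))
  let item := PySem.Str.strip (PySem.Str.join " " dp.2)
  (dp.1, if item = "" then none else some item)

-- ===== PRECONDITION & SPEC =====
def Spec_parse_trace_shortcut_args_py (args : List String) (out : Option Int × Option String) : Prop := out = parse_trace_shortcut_args_py_alt args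
instance (args : List String) (out : Option Int × Option String) : Decidable (Spec_parse_trace_shortcut_args_py args out) := by unfold Spec_parse_trace_shortcut_args_py; infer_instance

-- ===== CLAIM (what is proved, stated in full; the proofs are below) =====
def Claim_equal_parse_trace_shortcut_args_py : Prop := ∀ (args : List String), Dom_parse_trace_shortcut_args_py args → Spec_parse_trace_shortcut_args_py args (parse_trace_shortcut_args_py args)

-- ===== LEMMAS AND PROOFS =====

-- first all-digit element together with its position, structurally
def pvPivot : List String → Option (Nat × String)
  | [] => none
  | a :: rest =>
    if PySem.Str.strIsdigit a then some (0, a)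
    else (pvPivot rest).map (fun p => (p.1 + 1, p.2))

def pvStep : Option Int × List String → String → Option Int × List String :=
  fun st a =>
    if PySem.Str.strIsdigit a && st.1.isNone then (some (pvDigitsToInt a), st.2)
    else (st.1, st.2 ++ [a])

theorem pvFold_some (args : List String) (n : Int) (acc : List String) :
    args.foldl pvStep (some n, acc) = (some n, acc ++ args) := by
  induction args generalizing acc with
  | nil => simp
  | cons a rest ih => simp [pvStep, List.foldl_cons, ih]

theorem pvFold_none (args : List String) (acc : List String) :
    args.foldl pvStep (none, acc) =
      match pvPivot args with
      | none => (none, acc ++ args)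
      | some (k, a) => (some (pvDigitsToInt a), acc ++ (args.take k ++ args.drop (k + 1))) := by
  induction args generalizing acc with
  | nil => simp [pvPivot]
  | cons a rest ih =>
    by_cases h : PySem.Chars.strIsdigit a.toList = true
    · have hstep : pvStep (none, acc) a = (some (pvDigitsToInt a), acc) := by simp [pvStep, h]
      rw [List.foldl_cons, hstep, pvFold_some]
      simp [pvPivot, h]
    · have hstep : pvStep (none, acc) a = (none, acc ++ [a]) := by simp [pvStep, h]
      rw [List.foldl_cons, hstep, ih]
      cases hp : pvPivot rest with
      | none => simp [pvPivot, h, hp]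
      | some p =>
        obtain ⟨k, b⟩ := p
        simp [pvPivot, h, hp, List.take_succ_cons, List.drop_succ_cons]

theorem pvEnumFind (args : List String) (s : Nat) :
    (PySem.List.enumerate args (s : Int)).find? (fun p => PySem.Str.strIsdigit p.2) =
      (pvPivot args).map (fun p => (((s + p.1 : Nat) : Int), p.2)) := by
  induction args generalizing s with
  | nil => simp [PySem.List.enumerate_nil, pvPivot]
  | cons a rest ih =>
    rw [PySem.List.enumerate_cons]
    by_cases h : PySem.Chars.strIsdigit a.toList = true
    · simp [pvPivot, h]
    · have hs : ((s : Int) + 1) = (((s + 1 : Nat)) : Int) := by push_cast; ring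
      have hpa : ¬ (fun (p : Int × String) => PySem.Str.strIsdigit p.2) (((s : Int)), a) = true := by
        simp [h]
      have hfc : List.find? (fun p => PySem.Str.strIsdigit p.2)
            (((s : Int), a) :: PySem.List.enumerate rest ((s : Int) + 1))
          = List.find? (fun p => PySem.Str.strIsdigit p.2) (PySem.List.enumerate rest ((s : Int) + 1)) :=
        List.find?_cons_of_neg hpa
      rw [hfc, hs, ih (s + 1)]
      have hpiv : pvPivot (a :: rest) = (pvPivot rest).map (fun p => (p.1 + 1, p.2)) := by
        simp [pvPivot, h]
      rw [hpiv]
      cases hp : pvPivot rest with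
      | none => rfl
      | some p =>
        obtain ⟨k, b⟩ := p
        have hk : (s + 1) + k = s + (k + 1) := by omega
        simp only [Option.map_some, hk]

-- ===== VERDICT (by name: the statement is the Claim_ definition above) =====
theorem parse_trace_shortcut_args_py_spec : Claim_equal_parse_trace_shortcut_args_py := by
  intro args _
  unfold Spec_parse_trace_shortcut_args_py parse_trace_shortcut_args_py parse_trace_shortcut_args_py_alt
  have hA : args.foldl
      (fun (st : Option Int × List String) a =>
        if PySem.Str.strIsdigit a && st.1.isNone then (some (pvDigitsToInt a), st.2)
        else (st.1, st.2 ++ [a]))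
      ((none : Option Int), ([] : List String)) = args.foldl pvStep (none, []) := rfl
  rw [hA, pvFold_none]
  have hE := pvEnumFind args 0
  simp only [Nat.cast_zero, zero_add] at hE
  rw [hE]
  cases hp : pvPivot args with
  | none => simp
  | some p =>
    obtain ⟨k, a⟩ := p
    simp
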